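-- pv_equiv track=rewrite | github.com/adheep04/algorhythmn | backend/api_server.py | _bucket_preferences
-- ===== SOURCE A (Python) =====
-- from typing import Dict, List
--
-- def _bucket_preferences(ratings: List[Dict[str, str]]) -> Dict[str, List[str]]:
--     buckets: Dict[str, List[str]] = {key: [] for key in ("love", "like", "dislike", "hate")}
--     for entry in ratings:
--         artist = entry.get("artist", "").strip()
--         rating_value = (entry.get("rating", "") or "").lower()
--         if artist and rating_value in buckets:
--             if artist not in buckets[rating_value]:
--                 buckets[rating_value].append(artist)
--
--     # Promote likes if the user never selected "love"
--     if not buckets["love"] and buckets["like"]: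
--         buckets["love"] = buckets["like"][:3]
--
--     return buckets
-- ===== SOURCE B (Python) =====
-- from typing import Dict, List
--
-- def _bucket_preferences(ratings: List[Dict[str, str]]) -> Dict[str, List[str]]:
--     def pick(key: str) -> List[str]:
--         out = []
--         for entry in ratings:
--             artist = entry.get("artist", "").strip()
--             rating_value = (entry.get("rating", "") or "").lower()
--             if artist and rating_value == key:
--                 out.append(artist)
--         return out
--
--     buckets = {key: list(dict.fromkeys(pick(key)))
--                for key in ("love", "like", "dislike", "hate")}
--
--     if not buckets["love"] and buckets["like"]:
--         buckets["love"] = buckets["like"][:3]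
--
--     return buckets
-- ===== Notes on version B (the rewrite author's own statement) =====
-- stated objective: alternative
-- what changed: Replaces the single interleaved loop with a membership check before every insert by a per-key collect-all pass followed by a deferred dict.fromkeys dedup, with the promotion applied afterwards.
import Mathlib
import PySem

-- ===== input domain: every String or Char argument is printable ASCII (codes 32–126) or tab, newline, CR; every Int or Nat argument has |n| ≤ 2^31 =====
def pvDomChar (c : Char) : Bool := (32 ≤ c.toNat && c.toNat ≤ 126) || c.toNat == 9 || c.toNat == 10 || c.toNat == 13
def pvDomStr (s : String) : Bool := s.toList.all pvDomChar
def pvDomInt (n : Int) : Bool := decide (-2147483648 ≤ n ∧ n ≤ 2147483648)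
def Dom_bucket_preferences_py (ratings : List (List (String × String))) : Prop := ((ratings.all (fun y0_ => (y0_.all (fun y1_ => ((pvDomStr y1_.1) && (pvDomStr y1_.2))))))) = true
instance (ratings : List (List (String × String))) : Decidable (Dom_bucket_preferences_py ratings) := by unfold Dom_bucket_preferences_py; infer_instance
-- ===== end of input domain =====

-- B is an alternative decomposition of A (per-key collect pass, then a deferred dict.fromkeys dedup); same cost, return value proved equal.

-- shared guard lines (identical in both Pythons): artist = entry.get("artist","").strip(); rating = (entry.get("rating","") or "").lower()
def pvArtist (entry : List (String × String)) : String :=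
  PySem.Str.strip (PySem.Dict.getD ⟨entry⟩ "artist" "")

def pvRating (entry : List (String × String)) : String :=
  let v := PySem.Dict.getD (⟨entry⟩ : PySem.Dict String String) "rating" ""
  PySem.Str.lower (if v = "" then "" else v)

-- ===== PORT A =====
-- 'if artist not in buckets[rv]: buckets[rv].append(artist)'
def pvAdd (l : List String) (a : String) : List String :=
  if a ∈ l then l else l ++ [a]

-- A's loop body: route the entry to its bucket with an inline membership check
def pvStepA (b : List String × List String × List String × List String)
    (entry : List (String × String)) : List String × List String × List String × List String :=
  let artist := pvArtist entry
  let rv := pvRating entry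
  if artist ≠ "" then
    if rv = "love" then (pvAdd b.1 artist, b.2.1, b.2.2.1, b.2.2.2)
    else if rv = "like" then (b.1, pvAdd b.2.1 artist, b.2.2.1, b.2.2.2)
    else if rv = "dislike" then (b.1, b.2.1, pvAdd b.2.2.1 artist, b.2.2.2)
    else if rv = "hate" then (b.1, b.2.1, b.2.2.1, pvAdd b.2.2.2 artist)
    else b
  else b

def bucket_preferences_py (ratings : List (List (String × String))) : List (String × List String) :=
  let b := ratings.foldl pvStepA ([], [], [], [])
  let love := if b.1 = [] ∧ b.2.1 ≠ [] then b.2.1.take 3 else b.1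
  [("love", love), ("like", b.2.1), ("dislike", b.2.2.1), ("hate", b.2.2.2)]

-- ===== PORT B =====
-- B's pick(key) loop body: collect every matching artist, no dedup here
def pvPickStep (key : String) (out : List String) (entry : List (String × String)) : List String :=
  if pvArtist entry ≠ "" ∧ pvRating entry = key then out ++ [pvArtist entry] else out

def pvPick (ratings : List (List (String × String))) (key : String) : List String :=
  ratings.foldl (pvPickStep key) []

def bucket_preferences_py_alt (ratings : List (List (String × String))) : List (String × List String) :=
  let love0 := PySem.List.dedup (pvPick ratings "love")       -- list(dict.fromkeys(...))
  let like := PySem.List.dedup (pvPick ratings "like")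
  let dislike := PySem.List.dedup (pvPick ratings "dislike")
  let hate := PySem.List.dedup (pvPick ratings "hate")
  let love := if love0 = [] ∧ like ≠ [] then like.take 3 else love0
  [("love", love), ("like", like), ("dislike", dislike), ("hate", hate)]

-- ===== PRECONDITION & SPEC =====
def Spec_bucket_preferences_py (ratings : List (List (String × String))) (out : List (String × List String)) : Prop := out = bucket_preferences_py_alt ratings
instance (ratings : List (List (String × String))) (out : List (String × List String)) : Decidable (Spec_bucket_preferences_py ratings out) := by unfold Spec_bucket_preferences_py; infer_instance

-- ===== CLAIM (what is proved, stated in full; the proofs are below) =====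
def Claim_equal_bucket_preferences_py : Prop := ∀ (ratings : List (List (String × String))), Dom_bucket_preferences_py ratings → Spec_bucket_preferences_py ratings (bucket_preferences_py ratings)

-- ===== LEMMAS AND PROOFS =====

theorem pvPickStep_split (k : String) (acc : List String) (e : List (String × String)) :
    pvPickStep k acc e = acc ++ pvPickStep k [] e := by
  unfold pvPickStep; split_ifs <;> simp

theorem pvPick_acc (k : String) (rs : List (List (String × String))) :
    ∀ acc : List String, rs.foldl (pvPickStep k) acc = acc ++ rs.foldl (pvPickStep k) [] := by
  induction rs with
  | nil => intro acc; simp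
  | cons e rs ih =>
    intro acc
    simp only [List.foldl_cons]
    rw [ih (pvPickStep k acc e), ih (pvPickStep k [] e), pvPickStep_split k acc e,
      List.append_assoc]

theorem pvPick_cons (e : List (String × String)) (rs : List (List (String × String))) (k : String) :
    pvPick (e :: rs) k = pvPickStep k [] e ++ pvPick rs k := by
  unfold pvPick
  simp only [List.foldl_cons]
  exact pvPick_acc k rs (pvPickStep k [] e)

theorem pvAdd_eq_set_add (l : List String) (a : String) :
    pvAdd l a = PySem.Set.add l a := by
  simp [pvAdd, PySem.Set.add]

theorem dedup_eq_foldl_pvAdd (l : List String) :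
    PySem.List.dedup l = l.foldl pvAdd [] := by
  simp only [PySem.List.dedup, PySem.Set.ofList, PySem.Set.empty]
  congr 1
  funext s a
  exact (pvAdd_eq_set_add s a).symm

theorem foldA_eq (rs : List (List (String × String))) :
    ∀ s : List String × List String × List String × List String,
      rs.foldl pvStepA s =
        ((pvPick rs "love").foldl pvAdd s.1,
         (pvPick rs "like").foldl pvAdd s.2.1,
         (pvPick rs "dislike").foldl pvAdd s.2.2.1,
         (pvPick rs "hate").foldl pvAdd s.2.2.2) := by
  induction rs with
  | nil => intro s; simp [pvPick]
  | cons e rs ih =>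
    intro s
    simp only [List.foldl_cons, ih (pvStepA s e),
      pvPick_cons e rs, List.foldl_append]
    by_cases ha : pvArtist e = ""
    · simp [pvStepA, pvPickStep, ha]
    · by_cases h1 : pvRating e = "love"
      · simp [pvStepA, pvPickStep, ha, h1]
      · by_cases h2 : pvRating e = "like"
        · simp [pvStepA, pvPickStep, ha, h2]
        · by_cases h3 : pvRating e = "dislike"
          · simp [pvStepA, pvPickStep, ha, h3]
          · by_cases h4 : pvRating e = "hate"
            · simp [pvStepA, pvPickStep, ha, h1, h2, h3, h4]
            · simp [pvStepA, pvPickStep, ha, h1, h2, h3, h4]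

-- ===== VERDICT (by name: the statement is the Claim_ definition above) =====
theorem bucket_preferences_py_spec : Claim_equal_bucket_preferences_py := by
  intro ratings _
  unfold Spec_bucket_preferences_py bucket_preferences_py bucket_preferences_py_alt
  simp only [foldA_eq ratings ([], [], [], []), dedup_eq_foldl_pvAdd]
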